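-- pv_equiv track=rewrite | github.com/janvanwassenhove/mITyStudio | scripts/update_openai_models.py | categorize_models
-- ===== SOURCE A (Python) =====
-- from typing import List, Dict, Any
--
-- def categorize_models(models: List[Dict[str, Any]]) -> Dict[str, List[str]]:
--     """Categorize models by family"""
--     categories = {
--         'gpt-5': [],
--         'o1': [],
--         'gpt-4o': [],
--         'gpt-4': [],
--         'gpt-3.5': []
--     }
--
--     for model in models:
--         model_id = model['id']
--
--         if 'gpt-5' in model_id.lower():
--             categories['gpt-5'].append(model_id)
--         elif 'o1' in model_id.lower():
--             categories['o1'].append(model_id)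
--         elif 'gpt-4o' in model_id.lower():
--             categories['gpt-4o'].append(model_id)
--         elif 'gpt-4' in model_id.lower():
--             categories['gpt-4'].append(model_id)
--         elif 'gpt-3.5' in model_id.lower():
--             categories['gpt-3.5'].append(model_id)
--
--     return categories
-- ===== SOURCE B (Python) =====
-- from typing import List, Dict, Any
--
-- PATTERNS = ['gpt-5', 'o1', 'gpt-4o', 'gpt-4', 'gpt-3.5']
--
-- def categorize_models(models: List[Dict[str, Any]]) -> Dict[str, List[str]]:
--     """Categorize models by family: one filtering pass per family over a
--     shrinking pool of ids (instead of a per-model elif chain)."""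
--     remaining = [m['id'] for m in models]
--     categories = {}
--     for pat in PATTERNS:
--         categories[pat] = [mid for mid in remaining if pat in mid.lower()]
--         remaining = [mid for mid in remaining if pat not in mid.lower()]
--     return categories
-- ===== Notes on version B (the rewrite author's own statement) =====
-- stated objective: alternative
-- what changed: Replaced the per-model elif chain that appends into five pre-built lists with one filtering pass per family over a shrinking pool of ids (each pattern keeps its matches and removes them from the pool), building the dict one category at a time.
import Mathlib
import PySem

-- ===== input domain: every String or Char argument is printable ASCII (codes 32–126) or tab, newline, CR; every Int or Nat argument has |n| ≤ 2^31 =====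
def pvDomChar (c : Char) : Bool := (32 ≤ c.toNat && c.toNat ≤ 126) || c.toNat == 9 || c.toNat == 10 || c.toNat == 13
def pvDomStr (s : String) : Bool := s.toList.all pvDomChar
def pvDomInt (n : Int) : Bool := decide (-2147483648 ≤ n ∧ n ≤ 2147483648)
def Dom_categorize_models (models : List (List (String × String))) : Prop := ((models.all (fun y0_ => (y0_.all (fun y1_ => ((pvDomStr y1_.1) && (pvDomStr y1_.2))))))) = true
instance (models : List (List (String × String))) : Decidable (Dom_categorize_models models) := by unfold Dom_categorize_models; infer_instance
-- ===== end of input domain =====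

-- B differs from A only in decomposition (per-family filtering passes over a shrinking
-- pool of ids instead of a per-model elif chain); return values agree wherever A returns.

-- ===== PORT A =====
-- model['id']; Pre_ guarantees the key is present, so getD "" is never the default
def pvIdOf (model : List (String × String)) : String :=
  ((PySem.Dict.mk model).get? "id").getD ""

-- 'pat in model_id.lower()'
def pvHit (pat mid : String) : Bool := PySem.Str.isIn pat (PySem.Str.lower mid)

-- one iteration of A's for-loop: the elif chain over the five category lists
def pvStepA (st : List String × List String × List String × List String × List String)
    (model : List (String × String)) :
    List String × List String × List String × List String × List String :=
  let mid := pvIdOf model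
  if pvHit "gpt-5" mid then (st.1 ++ [mid], st.2.1, st.2.2.1, st.2.2.2.1, st.2.2.2.2)
  else if pvHit "o1" mid then (st.1, st.2.1 ++ [mid], st.2.2.1, st.2.2.2.1, st.2.2.2.2)
  else if pvHit "gpt-4o" mid then (st.1, st.2.1, st.2.2.1 ++ [mid], st.2.2.2.1, st.2.2.2.2)
  else if pvHit "gpt-4" mid then (st.1, st.2.1, st.2.2.1, st.2.2.2.1 ++ [mid], st.2.2.2.2)
  else if pvHit "gpt-3.5" mid then (st.1, st.2.1, st.2.2.1, st.2.2.2.1, st.2.2.2.2 ++ [mid])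
  else st

def categorize_models (models : List (List (String × String))) : List (String × List String) :=
  let st := models.foldl pvStepA ([], [], [], [], [])
  [("gpt-5", st.1), ("o1", st.2.1), ("gpt-4o", st.2.2.1), ("gpt-4", st.2.2.2.1),
   ("gpt-3.5", st.2.2.2.2)]

-- ===== PORT B =====
-- B's loop over PATTERNS: keep the matches of pat, shrink the pool to the non-matches
def pvGoB : List String → List String → List (String × List String)
  | [], _ => []
  | pat :: pats, remaining =>
      (pat, remaining.filter (fun mid => pvHit pat mid)) ::
      pvGoB pats (remaining.filter (fun mid => !pvHit pat mid))

def categorize_models_alt (models : List (List (String × String))) : List (String × List String) :=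
  pvGoB ["gpt-5", "o1", "gpt-4o", "gpt-4", "gpt-3.5"] (models.map pvIdOf)

-- ===== PRECONDITION & SPEC =====
-- Pre_ excludes models missing the 'id' key, on which A (and B) raise KeyError.
def Pre_categorize_models (models : List (List (String × String))) : Prop :=
  ∀ m ∈ models, (PySem.Dict.mk m).contains "id" = true
instance (models : List (List (String × String))) : Decidable (Pre_categorize_models models) := by
  unfold Pre_categorize_models; infer_instance

def pvWitness_categorize_models : (List (List (String × String))) :=
  [[("id", "gpt-4o-mini")], [("id", "o1-preview")]]

def Spec_categorize_models (models : List (List (String × String))) (out : List (String × List String)) : Prop := out = categorize_models_alt models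
instance (models : List (List (String × String))) (out : List (String × List String)) : Decidable (Spec_categorize_models models out) := by unfold Spec_categorize_models; infer_instance

-- ===== CLAIM (what is proved, stated in full; the proofs are below) =====
def Claim_equal_categorize_models : Prop := ∀ (models : List (List (String × String))), Dom_categorize_models models → Pre_categorize_models models → Spec_categorize_models models (categorize_models models)

-- ===== LEMMAS AND PROOFS =====

-- first-match predicates: the elif chain assigns mid to category i iff pvF i holds
def pvF1 (mid : String) : Bool := pvHit "gpt-5" mid
def pvF2 (mid : String) : Bool := !pvHit "gpt-5" mid && pvHit "o1" mid
def pvF3 (mid : String) : Bool := !pvHit "gpt-5" mid && !pvHit "o1" mid && pvHit "gpt-4o" mid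
def pvF4 (mid : String) : Bool :=
  !pvHit "gpt-5" mid && !pvHit "o1" mid && !pvHit "gpt-4o" mid && pvHit "gpt-4" mid
def pvF5 (mid : String) : Bool :=
  !pvHit "gpt-5" mid && !pvHit "o1" mid && !pvHit "gpt-4o" mid && !pvHit "gpt-4" mid &&
  pvHit "gpt-3.5" mid

-- A's fold appends, per component, exactly the first-match filter of the ids
set_option maxHeartbeats 1600000 in
lemma foldA_eq (models : List (List (String × String)))
    (a b c d e : List String) :
    models.foldl pvStepA (a, b, c, d, e) =
      (a ++ (models.map pvIdOf).filter pvF1,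
       b ++ (models.map pvIdOf).filter pvF2,
       c ++ (models.map pvIdOf).filter pvF3,
       d ++ (models.map pvIdOf).filter pvF4,
       e ++ (models.map pvIdOf).filter pvF5) := by
  induction models generalizing a b c d e with
  | nil => simp
  | cons m ms ih =>
    simp only [List.foldl_cons, List.map_cons, List.filter_cons, pvStepA,
      pvF1, pvF2, pvF3, pvF4, pvF5]
    by_cases h1 : pvHit "gpt-5" (pvIdOf m) = true <;>
      by_cases h2 : pvHit "o1" (pvIdOf m) = true <;>
        by_cases h3 : pvHit "gpt-4o" (pvIdOf m) = true <;>
          by_cases h4 : pvHit "gpt-4" (pvIdOf m) = true <;>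
            by_cases h5 : pvHit "gpt-3.5" (pvIdOf m) = true <;>
              simp [ih, h1, h2, h3, h4, h5]

-- ===== VERDICT (by name: the statement is the Claim_ definition above) =====
set_option maxHeartbeats 1600000 in
theorem categorize_models_spec : Claim_equal_categorize_models := by
  intro models _ _
  unfold Spec_categorize_models categorize_models categorize_models_alt
  rw [foldA_eq]
  simp only [pvGoB, List.filter_filter, List.nil_append]
  refine List.ext_getElem rfl ?_
  intro i hi hi'
  simp only [List.length_cons, List.length_nil] at hi
  interval_cases i <;>
    · simp only [List.getElem_cons_zero, List.getElem_cons_succ]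
      refine Prod.ext rfl (List.filter_congr ?_)
      intro x _
      cases h1 : pvHit "gpt-5" x <;> cases h2 : pvHit "o1" x <;>
        cases h3 : pvHit "gpt-4o" x <;> cases h4 : pvHit "gpt-4" x <;>
          simp [pvF1, pvF2, pvF3, pvF4, pvF5, h1, h2, h3, h4]
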